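-- pv_equiv track=rewrite | github.com/kwrkb/SQLiteView | src/sqliteviewer/database.py | _extract_first_keyword
-- ===== SOURCE A (Python) =====
-- from typing import Iterable, List, Optional, Sequence, Tuple
--
-- def _extract_first_keyword(sql: str) -> Optional[str]:
--     index = 0
--     length = len(sql)
--     while index < length:
--         char = sql[index]
--         if char.isspace():
--             index += 1
--             continue
--         if char == '-' and index + 1 < length and sql[index + 1] == '-':
--             newline = sql.find('\n', index + 2)
--             index = length if newline == -1 else newline + 1
--             continue
--         if char == '/' and index + 1 < length and sql[index + 1] == '*':
--             end = sql.find('*/', index + 2)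
--             index = length if end == -1 else end + 2
--             continue
--         if char in '([':
--             index += 1
--             continue
--         start = index
--         while index < length and (sql[index].isalpha() or sql[index] == '_'):
--             index += 1
--         if start != index:
--             return sql[start:index].upper()
--         index += 1
--     return None
-- ===== SOURCE B (Python) =====
-- from typing import Optional
--
--
-- def _extract_first_keyword(sql: str) -> Optional[str]:
--     # Phase 1: strip comments, jumping straight to each opener with str.find,
--     # replacing every comment with a single space.
--     pieces = []
--     rest = sql
--     while rest:
--         d = rest.find('--')
--         b = rest.find('/*')
--         if d == -1 and b == -1:
--             pieces.append(rest)
--             break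
--         if b == -1 or (d != -1 and d < b):
--             pieces.append(rest[:d])
--             nl = rest.find('\n', d + 2)
--             rest = '' if nl == -1 else rest[nl + 1:]
--         else:
--             pieces.append(rest[:b])
--             end = rest.find('*/', b + 2)
--             rest = '' if end == -1 else rest[end + 2:]
--         pieces.append(' ')
--     stripped = ''.join(pieces)
--     # Phase 2: blank out every non-word character and take the first word.
--     masked = ''.join(c if c.isalpha() or c == '_' else ' ' for c in stripped)
--     words = masked.split()
--     return words[0].upper() if words else None
-- ===== Notes on version B (the rewrite author's own statement) =====
-- stated objective: alternative
-- what changed: A is a single-pass character state machine with an early return; B first strips all comments by jumping between openers with str.find (each replaced by a space), then blanks every non-word character and takes the first token of str.split().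
import Mathlib
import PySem

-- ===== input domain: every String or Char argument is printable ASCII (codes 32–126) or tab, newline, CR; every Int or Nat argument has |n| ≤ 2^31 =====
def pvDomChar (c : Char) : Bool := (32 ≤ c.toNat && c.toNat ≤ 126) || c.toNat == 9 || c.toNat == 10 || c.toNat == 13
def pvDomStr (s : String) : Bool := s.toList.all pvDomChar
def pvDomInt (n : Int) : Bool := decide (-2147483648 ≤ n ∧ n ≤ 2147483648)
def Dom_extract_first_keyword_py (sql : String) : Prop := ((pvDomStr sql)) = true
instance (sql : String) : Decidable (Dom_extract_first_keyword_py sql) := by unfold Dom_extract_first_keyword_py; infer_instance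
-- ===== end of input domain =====

-- B: two-phase rewrite (strip comments by find-jumps, then mask & split); same return value as A, no speed claim.

-- ===== PORT A =====
-- helper lemma used only by the ports' termination proofs:
-- a 2-char needle found in cs ends within cs, so needle-index + 2 ≤ cs.length
theorem pvFind2_add_two_le (cs : List Char) (a b : Char)
    (h : PySem.Chars.find cs [a, b] ≠ -1) :
    (PySem.Chars.find cs [a, b]).toNat + 2 ≤ cs.length := by
  have h1 := PySem.Chars.neg_one_le_find cs [a, b]
  have h0 : 0 ≤ PySem.Chars.find cs [a, b] := by omega
  have hp := (PySem.Chars.find_spec h0).1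
  have := hp.length_le
  simp at this
  have h2 := PySem.Chars.find_le_length cs [a, b]
  omega

-- inner word-scan loop of A ("while index < length and (isalpha or '_')")
def pvWordEnd (cs : List Char) (index : Nat) : Nat :=
  if h : index < cs.length then
    if PySem.Chars.isalpha cs[index] || cs[index] == '_' then pvWordEnd cs (index + 1)
    else index
  else index
termination_by cs.length - index

-- main scanning loop of A; the Python "index+1 < length and sql[index+1] == c" bounds
-- check is encoded as "cs[index+1]? = some c"
def pvALoop (cs : List Char) (index : Nat) : Option (List Char) :=
  if h : index < cs.length then
    let c := cs[index]
    if PySem.Chars.isspace c then pvALoop cs (index + 1)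
    else if hline : c = '-' ∧ cs[index + 1]? = some '-' then
      let newline := PySem.Chars.findFrom cs ['\n'] ((index : Int) + 2) none
      pvALoop cs (if newline = -1 then cs.length else (newline + 1).toNat)
    else if hblock : c = '/' ∧ cs[index + 1]? = some '*' then
      let e := PySem.Chars.findFrom cs ['*', '/'] ((index : Int) + 2) none
      pvALoop cs (if e = -1 then cs.length else (e + 2).toNat)
    else if c = '(' ∨ c = '[' then pvALoop cs (index + 1)
    else
      let j := pvWordEnd cs index
      if index ≠ j then some (PySem.Chars.upper (PySem.List.slice cs (some (index : Int)) (some (j : Int))))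
      else pvALoop cs (index + 1)
  else none
termination_by cs.length - index
decreasing_by
  · omega
  · have hk : index + 2 ≤ cs.length := by
      rcases List.getElem?_eq_some_iff.mp hline.2 with ⟨h1, -⟩
      omega
    have hcast : ((index : Int) + 2) = ((index + 2 : Nat) : Int) := by push_cast; ring
    split
    · omega
    · rename_i hne
      have hne' : PySem.Chars.findFrom cs ['\n'] (((index + 2 : Nat)) : Int) none ≠ -1 := by
        rw [← hcast]; exact hne
      have hs := (PySem.Chars.findFrom_natCast_spec cs ['\n'] (index + 2) hk hne').1
      rw [← hcast] at hs
      omega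
  · have hk : index + 2 ≤ cs.length := by
      rcases List.getElem?_eq_some_iff.mp hblock.2 with ⟨h1, -⟩
      omega
    have hcast : ((index : Int) + 2) = ((index + 2 : Nat) : Int) := by push_cast; ring
    split
    · omega
    · rename_i hne
      have hne' : PySem.Chars.findFrom cs ['*', '/'] (((index + 2 : Nat)) : Int) none ≠ -1 := by
        rw [← hcast]; exact hne
      have hs := (PySem.Chars.findFrom_natCast_spec cs ['*', '/'] (index + 2) hk hne').1
      rw [← hcast] at hs
      omega
  · omega
  · omega

def extract_first_keyword_py (sql : String) : Option String :=
  (pvALoop sql.toList 0).map String.ofList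

-- ===== PORT B =====
-- phase 1 of B: jump from comment opener to comment opener with find, copying the
-- text in between and replacing each comment by one space
def pvBStrip (cs : List Char) : List Char :=
  match cs with
  | [] => []
  | x :: xs =>
    let cs := x :: xs
    let d := PySem.Chars.find cs ['-', '-']
    let b := PySem.Chars.find cs ['/', '*']
    if d = -1 ∧ b = -1 then cs
    else if hline : b = -1 ∨ (d ≠ -1 ∧ d < b) then
      PySem.List.slice cs none (some d) ++ [' '] ++
        (let nl := PySem.Chars.findFrom cs ['\n'] (d + 2) none
         if nl = -1 then [] else pvBStrip (PySem.List.slice cs (some (nl + 1)) none))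
    else
      PySem.List.slice cs none (some b) ++ [' '] ++
        (let e := PySem.Chars.findFrom cs ['*', '/'] (b + 2) none
         if e = -1 then [] else pvBStrip (PySem.List.slice cs (some (e + 2)) none))
termination_by cs.length
decreasing_by
  · rename_i hne
    have hd : PySem.Chars.find (x :: xs) ['-', '-'] ≠ -1 := by
      rcases hline with h | h
      · intro hdd; exact ‹¬(_ ∧ _)› ⟨hdd, h⟩
      · exact h.1
    have h0 : (0 : Int) ≤ PySem.Chars.find (x :: xs) ['-', '-'] := by
      have := PySem.Chars.neg_one_le_find (x :: xs) ['-', '-']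
      omega
    have hk := pvFind2_add_two_le (x :: xs) '-' '-' hd
    have hcast : (PySem.Chars.find (x :: xs) ['-', '-'] + 2) = (((PySem.Chars.find (x :: xs) ['-', '-']).toNat + 2 : Nat) : Int) := by omega
    have hne' : PySem.Chars.findFrom (x :: xs) ['\n'] ((((PySem.Chars.find (x :: xs) ['-', '-']).toNat + 2 : Nat)) : Int) none ≠ -1 := by
      rw [← hcast]; exact hne
    have hs := (PySem.Chars.findFrom_natCast_spec (x :: xs) ['\n'] ((PySem.Chars.find (x :: xs) ['-', '-']).toNat + 2) hk hne').1
    rw [← hcast] at hs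
    rw [PySem.List.slice_from _ (by omega : (0:Int) ≤ PySem.Chars.findFrom (x :: xs) ['\n'] (PySem.Chars.find (x :: xs) ['-', '-'] + 2) none + 1)]
    simp
    omega
  · rename_i hne
    have hb : PySem.Chars.find (x :: xs) ['/', '*'] ≠ -1 := by
      intro hbb
      exact hline (Or.inl hbb)
    have h0 : (0 : Int) ≤ PySem.Chars.find (x :: xs) ['/', '*'] := by
      have := PySem.Chars.neg_one_le_find (x :: xs) ['/', '*']
      omega
    have hk := pvFind2_add_two_le (x :: xs) '/' '*' hb
    have hcast : (PySem.Chars.find (x :: xs) ['/', '*'] + 2) = (((PySem.Chars.find (x :: xs) ['/', '*']).toNat + 2 : Nat) : Int) := by omega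
    have hne' : PySem.Chars.findFrom (x :: xs) ['*', '/'] ((((PySem.Chars.find (x :: xs) ['/', '*']).toNat + 2 : Nat)) : Int) none ≠ -1 := by
      rw [← hcast]; exact hne
    have hs := (PySem.Chars.findFrom_natCast_spec (x :: xs) ['*', '/'] ((PySem.Chars.find (x :: xs) ['/', '*']).toNat + 2) hk hne').1
    rw [← hcast] at hs
    rw [PySem.List.slice_from _ (by omega : (0:Int) ≤ PySem.Chars.findFrom (x :: xs) ['*', '/'] (PySem.Chars.find (x :: xs) ['/', '*'] + 2) none + 2)]
    simp
    omega

-- phase 2 of B: blank every non-word character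
def pvMask (cs : List Char) : List Char :=
  cs.map (fun c => if PySem.Chars.isalpha c || c == '_' then c else ' ')

def extract_first_keyword_py_alt (sql : String) : Option String :=
  let stripped := pvBStrip sql.toList
  let masked := pvMask stripped
  match PySem.Chars.split₀ masked with
  | [] => none
  | w :: _ => some (String.ofList (PySem.Chars.upper w))

-- ===== PRECONDITION & SPEC =====
def Spec_extract_first_keyword_py (sql : String) (out : Option String) : Prop := out = extract_first_keyword_py_alt sql
instance (sql : String) (out : Option String) : Decidable (Spec_extract_first_keyword_py sql out) := by unfold Spec_extract_first_keyword_py; infer_instance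

-- ===== CLAIM (what is proved, stated in full; the proofs are below) =====
def Claim_equal_extract_first_keyword_py : Prop := ∀ (sql : String), Dom_extract_first_keyword_py sql → Spec_extract_first_keyword_py sql (extract_first_keyword_py sql)

-- ===== LEMMAS AND PROOFS =====

-- word characters: letters and underscore (ASCII, as PySem.Chars.isalpha is)
def pvIsWord (c : Char) : Bool := PySem.Chars.isalpha c || c == '_'

-- drop everything up to and including the first occurrence of t (all if none)
def pvDropThru1 (t : Char) : List Char → List Char
  | [] => []
  | x :: xs => if x = t then xs else pvDropThru1 t xs

-- drop everything up to and including the first occurrence of the 2-char pattern a b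
def pvDropThru2 (a b : Char) : List Char → List Char
  | [] => []
  | x :: xs => if x = a ∧ xs.head? = some b then xs.tail else pvDropThru2 a b xs

theorem pvDropThru1_length_le (t : Char) (l : List Char) : (pvDropThru1 t l).length ≤ l.length := by
  induction l with
  | nil => simp [pvDropThru1]
  | cons x xs ih => simp only [pvDropThru1]; split <;> simp <;> omega

theorem pvDropThru2_length_le (a b : Char) (l : List Char) : (pvDropThru2 a b l).length ≤ l.length := by
  induction l with
  | nil => simp [pvDropThru2]
  | cons x xs ih =>
    simp only [pvDropThru2]; split <;> simp [List.length_tail] <;> omega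

-- reference: first keyword of a char list, head-recursive
def pvFirstKw : List Char → Option (List Char)
  | [] => none
  | c :: r =>
    if c = '-' ∧ r.head? = some '-' then pvFirstKw (pvDropThru1 '\n' r.tail)
    else if c = '/' ∧ r.head? = some '*' then pvFirstKw (pvDropThru2 '*' '/' r.tail)
    else if pvIsWord c then some (c :: r.takeWhile pvIsWord)
    else pvFirstKw r
termination_by l => l.length
decreasing_by
  · have h1 := pvDropThru1_length_le '\n' r.tail
    simp [List.length_tail] at *
    omega
  · have h1 := pvDropThru2_length_le '*' '/' r.tail
    simp [List.length_tail] at *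
    omega
  · simp

-- reference: comment stripping, head-recursive
def pvHStrip : List Char → List Char
  | [] => []
  | c :: r =>
    if c = '-' ∧ r.head? = some '-' then ' ' :: pvHStrip (pvDropThru1 '\n' r.tail)
    else if c = '/' ∧ r.head? = some '*' then ' ' :: pvHStrip (pvDropThru2 '*' '/' r.tail)
    else c :: pvHStrip r
termination_by l => l.length
decreasing_by
  · have h1 := pvDropThru1_length_le '\n' r.tail
    simp [List.length_tail] at *
    omega
  · have h1 := pvDropThru2_length_le '*' '/' r.tail
    simp [List.length_tail] at *
    omega
  · simp

-- reference: first word-character run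
def pvFirstWord : List Char → Option (List Char)
  | [] => none
  | c :: r => if pvIsWord c then some (c :: r.takeWhile pvIsWord) else pvFirstWord r

-- reference: first non-space run
def pvFirstNS : List Char → Option (List Char)
  | [] => none
  | c :: r => if PySem.Chars.isspace c then pvFirstNS r else some (c :: r.takeWhile (fun c => !PySem.Chars.isspace c))

-- one-step unfolding lemmas for the reference functions
theorem pvFirstKw_cons_line (c : Char) (r : List Char) (h : c = '-' ∧ r.head? = some '-') :
    pvFirstKw (c :: r) = pvFirstKw (pvDropThru1 '\n' r.tail) := by
  simp only [pvFirstKw]; rw [if_pos h]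

theorem pvFirstKw_cons_block (c : Char) (r : List Char)
    (h1 : ¬(c = '-' ∧ r.head? = some '-')) (h : c = '/' ∧ r.head? = some '*') :
    pvFirstKw (c :: r) = pvFirstKw (pvDropThru2 '*' '/' r.tail) := by
  simp only [pvFirstKw]; rw [if_neg h1, if_pos h]

theorem pvFirstKw_cons_word (c : Char) (r : List Char)
    (h1 : ¬(c = '-' ∧ r.head? = some '-')) (h2 : ¬(c = '/' ∧ r.head? = some '*'))
    (h3 : pvIsWord c = true) :
    pvFirstKw (c :: r) = some (c :: r.takeWhile pvIsWord) := by
  simp only [pvFirstKw]; rw [if_neg h1, if_neg h2, if_pos h3]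

theorem pvFirstKw_cons_skip (c : Char) (r : List Char)
    (h1 : ¬(c = '-' ∧ r.head? = some '-')) (h2 : ¬(c = '/' ∧ r.head? = some '*'))
    (h3 : pvIsWord c = false) :
    pvFirstKw (c :: r) = pvFirstKw r := by
  simp only [pvFirstKw]; rw [if_neg h1, if_neg h2, if_neg (by simp [h3])]

theorem pvHStrip_cons_line (c : Char) (r : List Char) (h : c = '-' ∧ r.head? = some '-') :
    pvHStrip (c :: r) = ' ' :: pvHStrip (pvDropThru1 '\n' r.tail) := by
  simp only [pvHStrip]; rw [if_pos h]

theorem pvHStrip_cons_block (c : Char) (r : List Char)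
    (h1 : ¬(c = '-' ∧ r.head? = some '-')) (h : c = '/' ∧ r.head? = some '*') :
    pvHStrip (c :: r) = ' ' :: pvHStrip (pvDropThru2 '*' '/' r.tail) := by
  simp only [pvHStrip]; rw [if_neg h1, if_pos h]

theorem pvHStrip_cons_skip (c : Char) (r : List Char)
    (h1 : ¬(c = '-' ∧ r.head? = some '-')) (h2 : ¬(c = '/' ∧ r.head? = some '*')) :
    pvHStrip (c :: r) = c :: pvHStrip r := by
  simp only [pvHStrip]; rw [if_neg h1, if_neg h2]

-- word characters are never whitespace
theorem pvWord_not_space (c : Char) (h : pvIsWord c = true) : PySem.Chars.isspace c = false := by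
  simp only [pvIsWord, PySem.Chars.isalpha, PySem.Chars.isupper, PySem.Chars.islower,
    Bool.or_eq_true, Bool.and_eq_true, decide_eq_true_eq, beq_iff_eq] at h
  simp only [PySem.Chars.isspace]
  rcases h with (⟨h1, h2⟩ | ⟨h1, h2⟩) | h
  · have g1 : 65 ≤ c.toNat := Fin.mk_le_mk.mp h1
    have g2 : c.toNat ≤ 90 := Fin.mk_le_mk.mp h2
    simp only [Bool.or_eq_false_iff, Bool.and_eq_false_iff, decide_eq_false_iff_not]
    omega
  · have g1 : 97 ≤ c.toNat := Fin.mk_le_mk.mp h1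
    have g2 : c.toNat ≤ 122 := Fin.mk_le_mk.mp h2
    simp only [Bool.or_eq_false_iff, Bool.and_eq_false_iff, decide_eq_false_iff_not]
    omega
  · subst h; decide

-- occurrence lemmas
theorem pvDropThru1_of_not_infix (t : Char) (l : List Char) (h : ¬ [t] <:+: l) : pvDropThru1 t l = [] := by
  induction l with
  | nil => simp [pvDropThru1]
  | cons x xs ih =>
    simp only [pvDropThru1]
    split
    · exact absurd ⟨[], xs, by simp [*]⟩ h
    · exact ih (fun hi => h (List.infix_cons hi))

theorem pvDropThru2_of_not_infix (a b : Char) (l : List Char) (h : ¬ [a, b] <:+: l) : pvDropThru2 a b l = [] := by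
  induction l with
  | nil => simp [pvDropThru2]
  | cons x xs ih =>
    simp only [pvDropThru2]
    split
    · rename_i hc
      obtain ⟨hx, hh⟩ := hc
      obtain ⟨y, ys, rfl⟩ : ∃ y ys, xs = y :: ys := by
        cases xs with
        | nil => simp at hh
        | cons y ys => exact ⟨y, ys, rfl⟩
      simp at hh
      exact absurd ⟨[], ys, by simp [hx, hh]⟩ h
    · exact ih (fun hi => h (List.infix_cons hi))

theorem pvDropThru1_of_first (t : Char) (l : List Char) (n : Nat)
    (hpre : [t] <+: l.drop n) (hmin : ∀ i < n, ¬ [t] <+: l.drop i) :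
    pvDropThru1 t l = l.drop (n + 1) := by
  induction l generalizing n with
  | nil => simp at hpre
  | cons x xs ih =>
    cases n with
    | zero =>
      simp only [List.drop_zero, List.cons_prefix_cons] at hpre
      simp [pvDropThru1, hpre.1.symm]
    | succ m =>
      have h0 := hmin 0 (Nat.succ_pos m)
      simp only [List.drop_zero, List.cons_prefix_cons] at h0
      have hx : x ≠ t := fun he => h0 ⟨he.symm, List.nil_prefix⟩
      simp only [pvDropThru1, if_neg hx]
      exact ih m (by simpa using hpre) (fun i hi => by simpa using hmin (i + 1) (by omega))

theorem pvDropThru2_of_first (a b : Char) (l : List Char) (n : Nat)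
    (hpre : [a, b] <+: l.drop n) (hmin : ∀ i < n, ¬ [a, b] <+: l.drop i) :
    pvDropThru2 a b l = l.drop (n + 2) := by
  induction l generalizing n with
  | nil => simp at hpre
  | cons x xs ih =>
    cases n with
    | zero =>
      simp only [List.drop_zero, List.cons_prefix_cons] at hpre
      obtain ⟨hx, hpre2⟩ := hpre
      obtain ⟨y, ys, rfl⟩ : ∃ y ys, xs = y :: ys := by
        cases xs with
        | nil => simp at hpre2
        | cons y ys => exact ⟨y, ys, rfl⟩
      simp only [List.cons_prefix_cons] at hpre2
      simp [pvDropThru2, hx.symm, hpre2.1.symm]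
    | succ m =>
      have h0 := hmin 0 (Nat.succ_pos m)
      simp only [List.drop_zero] at h0
      have hx : ¬ (x = a ∧ xs.head? = some b) := by
        rintro ⟨rfl, hh⟩
        obtain ⟨y, ys, rfl⟩ : ∃ y ys, xs = y :: ys := by
          cases xs with
          | nil => simp at hh
          | cons y ys => exact ⟨y, ys, rfl⟩
        simp at hh
        exact h0 (by simp [hh, List.cons_prefix_cons])
      simp only [pvDropThru2, if_neg hx]
      exact ih m (by simpa using hpre) (fun i hi => by simpa using hmin (i + 1) (by omega))

-- findFrom computes exactly the dropThru jump
theorem pvDropThru1_findFrom (cs : List Char) (t : Char) (k : Nat) (hk : k ≤ cs.length) :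
    pvDropThru1 t (cs.drop k) =
      if PySem.Chars.findFrom cs [t] (k : Int) none = -1 then []
      else cs.drop (PySem.Chars.findFrom cs [t] (k : Int) none + 1).toNat := by
  rw [PySem.Chars.findFrom_natCast cs [t] k hk]
  by_cases hf : PySem.Chars.find (cs.drop k) [t] = -1
  · rw [if_pos (by simp [hf])]
    exact pvDropThru1_of_not_infix t _ ((PySem.Chars.find_eq_neg_one_iff _ _).mp hf)
  · have h0 : 0 ≤ PySem.Chars.find (cs.drop k) [t] := by
      have := PySem.Chars.neg_one_le_find (cs.drop k) [t]; omega
    obtain ⟨hpre, hmin⟩ := PySem.Chars.find_spec h0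
    simp only [if_neg hf]
    rw [if_neg (by omega)]
    rw [pvDropThru1_of_first t (cs.drop k) (PySem.Chars.find (cs.drop k) [t]).toNat hpre hmin,
      List.drop_drop]
    congr 1
    omega

theorem pvDropThru2_findFrom (cs : List Char) (a b : Char) (k : Nat) (hk : k ≤ cs.length) :
    pvDropThru2 a b (cs.drop k) =
      if PySem.Chars.findFrom cs [a, b] (k : Int) none = -1 then []
      else cs.drop (PySem.Chars.findFrom cs [a, b] (k : Int) none + 2).toNat := by
  rw [PySem.Chars.findFrom_natCast cs [a, b] k hk]
  by_cases hf : PySem.Chars.find (cs.drop k) [a, b] = -1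
  · rw [if_pos (by simp [hf])]
    exact pvDropThru2_of_not_infix a b _ ((PySem.Chars.find_eq_neg_one_iff _ _).mp hf)
  · have h0 : 0 ≤ PySem.Chars.find (cs.drop k) [a, b] := by
      have := PySem.Chars.neg_one_le_find (cs.drop k) [a, b]; omega
    obtain ⟨hpre, hmin⟩ := PySem.Chars.find_spec h0
    simp only [if_neg hf]
    rw [if_neg (by omega)]
    rw [pvDropThru2_of_first a b (cs.drop k) (PySem.Chars.find (cs.drop k) [a, b]).toNat hpre hmin,
      List.drop_drop]
    congr 1
    omega

-- ===== A-side =====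
theorem pvWordEnd_eq (cs : List Char) (idx : Nat) :
    pvWordEnd cs idx = idx + ((cs.drop idx).takeWhile pvIsWord).length := by
  fun_induction pvWordEnd cs idx with
  | case1 idx h hw ih =>
    rw [ih, List.drop_eq_getElem_cons h]
    rw [List.takeWhile_cons, if_pos (by simpa [pvIsWord] using hw)]
    simp
    omega
  | case2 idx h hw =>
    rw [List.drop_eq_getElem_cons h]
    rw [List.takeWhile_cons, if_neg (by simpa [pvIsWord] using hw)]
    simp
  | case3 idx h =>
    rw [List.drop_eq_nil_iff.mpr (by omega)]
    simp

theorem pvALoop_eq (cs : List Char) (idx : Nat) :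
    pvALoop cs idx = (pvFirstKw (cs.drop idx)).map PySem.Chars.upper := by
  fun_induction pvALoop cs idx with
  | case1 idx h c hsp ih =>
    have hsp' : PySem.Chars.isspace cs[idx] = true := hsp
    have hc1 : ¬(cs[idx] = '-' ∧ (cs.drop (idx + 1)).head? = some '-') := by
      rintro ⟨he, -⟩; rw [he] at hsp'; exact absurd hsp' (by decide)
    have hc2 : ¬(cs[idx] = '/' ∧ (cs.drop (idx + 1)).head? = some '*') := by
      rintro ⟨he, -⟩; rw [he] at hsp'; exact absurd hsp' (by decide)
    have hw : pvIsWord cs[idx] = false := by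
      cases hww : pvIsWord cs[idx]
      · rfl
      · exact absurd (pvWord_not_space _ hww) (by simp [hsp'])
    rw [ih, List.drop_eq_getElem_cons h, pvFirstKw_cons_skip _ _ hc1 hc2 hw]
  | case2 idx h c hsp hc nl ih =>
    have hc' : cs[idx] = '-' ∧ cs[idx + 1]? = some '-' := hc
    have hk : idx + 2 ≤ cs.length := by
      rcases List.getElem?_eq_some_iff.mp hc'.2 with ⟨h1, -⟩; omega
    have hdt := pvDropThru1_findFrom cs '\n' (idx + 2) hk
    have hcast : (((idx + 2 : Nat)) : Int) = ((idx : Int) + 2) := by push_cast; ring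
    rw [hcast] at hdt
    rw [List.drop_eq_getElem_cons h,
      pvFirstKw_cons_line _ _ ⟨hc'.1, by rw [List.head?_drop]; exact hc'.2⟩,
      List.tail_drop, hdt]
    split
    · rename_i hnl
      simp only [hnl, dite_true] at ih
      rw [ih, List.drop_length]
    · rename_i hnl
      simp only [hnl, dite_false] at ih
      rw [ih]
  | case3 idx h c hsp hnc hc e ih =>
    have hc' : cs[idx] = '/' ∧ cs[idx + 1]? = some '*' := hc
    have hnc' : ¬(cs[idx] = '-' ∧ (cs.drop (idx + 1)).head? = some '-') := by
      rw [List.head?_drop]; exact hnc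
    have hk : idx + 2 ≤ cs.length := by
      rcases List.getElem?_eq_some_iff.mp hc'.2 with ⟨h1, -⟩; omega
    have hdt := pvDropThru2_findFrom cs '*' '/' (idx + 2) hk
    have hcast : (((idx + 2 : Nat)) : Int) = ((idx : Int) + 2) := by push_cast; ring
    rw [hcast] at hdt
    rw [List.drop_eq_getElem_cons h,
      pvFirstKw_cons_block _ _ hnc' ⟨hc'.1, by rw [List.head?_drop]; exact hc'.2⟩,
      List.tail_drop, hdt]
    split
    · rename_i hnl
      simp only [hnl, dite_true] at ih
      rw [ih, List.drop_length]
    · rename_i hnl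
      simp only [hnl, dite_false] at ih
      rw [ih]
  | case4 idx h c hsp hnc1 hnc2 hc ih =>
    have hc' : cs[idx] = '(' ∨ cs[idx] = '[' := hc
    have hne1 : ¬(cs[idx] = '-' ∧ (cs.drop (idx + 1)).head? = some '-') := by
      rw [List.head?_drop]; exact hnc1
    have hne2 : ¬(cs[idx] = '/' ∧ (cs.drop (idx + 1)).head? = some '*') := by
      rw [List.head?_drop]; exact hnc2
    have hw : pvIsWord cs[idx] = false := by
      rcases hc' with he | he <;> rw [he] <;> decide
    rw [ih, List.drop_eq_getElem_cons h, pvFirstKw_cons_skip _ _ hne1 hne2 hw]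
  | case5 idx h c hsp hnc1 hnc2 hbr j hj =>
    have hj' : idx ≠ pvWordEnd cs idx := hj
    have hwe := pvWordEnd_eq cs idx
    cases hw : pvIsWord cs[idx] with
    | false =>
      rw [List.drop_eq_getElem_cons h, List.takeWhile_cons, hw] at hwe
      simp at hwe
      exact absurd hwe.symm hj'
    | true =>
      have hne1 : ¬(cs[idx] = '-' ∧ (cs.drop (idx + 1)).head? = some '-') := by
        rw [List.head?_drop]; exact hnc1
      have hne2 : ¬(cs[idx] = '/' ∧ (cs.drop (idx + 1)).head? = some '*') := by
        rw [List.head?_drop]; exact hnc2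
      rw [List.drop_eq_getElem_cons h, pvFirstKw_cons_word _ _ hne1 hne2 hw, Option.map_some]
      have hpre : (cs.drop idx).takeWhile pvIsWord <+: cs.drop idx := List.takeWhile_prefix _
      have htake := List.prefix_iff_eq_take.mp hpre
      have hsl : PySem.List.slice cs (some (idx : Int)) (some ((pvWordEnd cs idx) : Int)) =
          cs[idx] :: (cs.drop (idx + 1)).takeWhile pvIsWord := by
        rw [PySem.List.slice_natCast, hwe, Nat.add_sub_cancel_left, ← htake,
          List.drop_eq_getElem_cons h, List.takeWhile_cons, hw]
        simp
      rw [hsl]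
  | case6 idx h c hsp hnc1 hnc2 hbr j hj ih =>
    have hj' : idx = pvWordEnd cs idx := by
      by_contra hne; exact hj hne
    have hwe := pvWordEnd_eq cs idx
    rw [← hj'] at hwe
    have htw : ((cs.drop idx).takeWhile pvIsWord).length = 0 := by omega
    rw [List.drop_eq_getElem_cons h, List.takeWhile_cons] at htw
    have hw : pvIsWord cs[idx] = false := by
      cases hww : pvIsWord cs[idx]
      · rfl
      · rw [hww] at htw; simp at htw
    have hne1 : ¬(cs[idx] = '-' ∧ (cs.drop (idx + 1)).head? = some '-') := by
      rw [List.head?_drop]; exact hnc1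
    have hne2 : ¬(cs[idx] = '/' ∧ (cs.drop (idx + 1)).head? = some '*') := by
      rw [List.head?_drop]; exact hnc2
    rw [ih, List.drop_eq_getElem_cons h, pvFirstKw_cons_skip _ _ hne1 hne2 hw]
  | case7 idx h =>
    rw [List.drop_eq_nil_iff.mpr (by omega)]
    simp [pvFirstKw]

-- ===== B-side =====
theorem pvPrefix_drop_infix {sub l : List Char} {i : Nat} (h : sub <+: l.drop i) : sub <:+: l :=
  h.isInfix.trans (l.drop_suffix i).isInfix

theorem pvHStrip_no_opener (cs : List Char)
    (h1 : ¬ ['-', '-'] <:+: cs) (h2 : ¬ ['/', '*'] <:+: cs) : pvHStrip cs = cs := by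
  induction cs with
  | nil => simp [pvHStrip]
  | cons x xs ih =>
    have hc1 : ¬(x = '-' ∧ xs.head? = some '-') := by
      rintro ⟨rfl, hh⟩
      obtain ⟨y, ys, rfl⟩ : ∃ y ys, xs = y :: ys := by
        cases xs with
        | nil => simp at hh
        | cons y ys => exact ⟨y, ys, rfl⟩
      simp at hh
      exact h1 ⟨[], ys, by simp [hh]⟩
    have hc2 : ¬(x = '/' ∧ xs.head? = some '*') := by
      rintro ⟨rfl, hh⟩
      obtain ⟨y, ys, rfl⟩ : ∃ y ys, xs = y :: ys := by
        cases xs with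
        | nil => simp at hh
        | cons y ys => exact ⟨y, ys, rfl⟩
      simp at hh
      exact h2 ⟨[], ys, by simp [hh]⟩
    rw [pvHStrip_cons_skip _ _ hc1 hc2,
      ih (fun hi => h1 (List.infix_cons hi)) (fun hi => h2 (List.infix_cons hi))]

theorem pvHStrip_take (cs : List Char) (m : Nat)
    (hmin : ∀ i < m, ¬ ['-', '-'] <+: cs.drop i ∧ ¬ ['/', '*'] <+: cs.drop i) :
    pvHStrip cs = cs.take m ++ pvHStrip (cs.drop m) := by
  induction cs generalizing m with
  | nil => simp
  | cons x xs ih =>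
    cases m with
    | zero => simp
    | succ k =>
      have h0 := hmin 0 (Nat.succ_pos k)
      simp only [List.drop_zero] at h0
      have hc1 : ¬(x = '-' ∧ xs.head? = some '-') := by
        rintro ⟨rfl, hh⟩
        obtain ⟨y, ys, rfl⟩ : ∃ y ys, xs = y :: ys := by
          cases xs with
          | nil => simp at hh
          | cons y ys => exact ⟨y, ys, rfl⟩
        simp at hh
        exact h0.1 (by simp [hh, List.cons_prefix_cons])
      have hc2 : ¬(x = '/' ∧ xs.head? = some '*') := by
        rintro ⟨rfl, hh⟩
        obtain ⟨y, ys, rfl⟩ : ∃ y ys, xs = y :: ys := by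
          cases xs with
          | nil => simp at hh
          | cons y ys => exact ⟨y, ys, rfl⟩
        simp at hh
        exact h0.2 (by simp [hh, List.cons_prefix_cons])
      rw [pvHStrip_cons_skip _ _ hc1 hc2,
        ih k (fun i hi => by simpa using hmin (i + 1) (by omega))]
      simp

theorem pvBStrip_eq (cs : List Char) : pvBStrip cs = pvHStrip cs := by
  fun_induction pvBStrip cs with
  | case1 => simp [pvHStrip]
  | case2 x xs cs' d b hd =>
    rw [pvHStrip_no_opener _ ((PySem.Chars.find_eq_neg_one_iff _ _).mp hd.1)
      ((PySem.Chars.find_eq_neg_one_iff _ _).mp hd.2)]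
  | case3 x xs cs' d b hnd hline ih =>
    have hcs : cs' = x :: xs := rfl
    have hd' : d = PySem.Chars.find (x :: xs) ['-', '-'] := rfl
    have hb' : b = PySem.Chars.find (x :: xs) ['/', '*'] := rfl
    simp only [hcs, hd', hb'] at hnd hline ih ⊢
    have hd : PySem.Chars.find (x :: xs) ['-', '-'] ≠ -1 := by
      rcases hline with h | h
      · intro hdd; exact hnd ⟨hdd, h⟩
      · exact h.1
    have h0 : (0 : Int) ≤ PySem.Chars.find (x :: xs) ['-', '-'] := by
      have := PySem.Chars.neg_one_le_find (x :: xs) ['-', '-']; omega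
    obtain ⟨hpre, hmind⟩ := PySem.Chars.find_spec h0
    have hminb : ∀ i < (PySem.Chars.find (x :: xs) ['-', '-']).toNat,
        ¬ ['/', '*'] <+: (x :: xs).drop i := by
      rcases hline with h | h
      · intro i hi hp
        exact (PySem.Chars.find_eq_neg_one_iff _ _).mp h (pvPrefix_drop_infix hp)
      · intro i hi
        have h0b : (0 : Int) ≤ PySem.Chars.find (x :: xs) ['/', '*'] := by
          have := PySem.Chars.neg_one_le_find (x :: xs) ['/', '*']; omega
        exact (PySem.Chars.find_spec h0b).2 i (by omega)
    have hk := pvFind2_add_two_le (x :: xs) '-' '-' hd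
    have hstrip := pvHStrip_take (x :: xs) (PySem.Chars.find (x :: xs) ['-', '-']).toNat
      (fun i hi => ⟨hmind i hi, hminb i hi⟩)
    obtain ⟨t, ht⟩ := hpre
    have ht2 : t = (x :: xs).drop ((PySem.Chars.find (x :: xs) ['-', '-']).toNat + 2) := by
      simpa [List.drop_drop, Nat.add_comm] using congrArg (List.drop 2) ht
    rw [hstrip, ← ht]
    simp only [List.cons_append, List.nil_append]
    rw [pvHStrip_cons_line '-' ('-' :: t) (by simp)]
    simp only [List.tail_cons]
    rw [ht2]
    have hdt := pvDropThru1_findFrom (x :: xs) '\n' ((PySem.Chars.find (x :: xs) ['-', '-']).toNat + 2) hk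
    have hcast : ((((PySem.Chars.find (x :: xs) ['-', '-']).toNat + 2 : Nat)) : Int)
        = PySem.Chars.find (x :: xs) ['-', '-'] + 2 := by omega
    rw [hcast] at hdt
    rw [hdt, PySem.List.slice_to _ h0]
    split
    · rename_i hnl
      simp [pvHStrip]
    · rename_i hnl
      have hnn : (0 : Int) ≤ PySem.Chars.findFrom (x :: xs) ['\n'] (PySem.Chars.find (x :: xs) ['-', '-'] + 2) none := by
        rw [← hcast] at hnl ⊢
        have hs := (PySem.Chars.findFrom_natCast_spec (x :: xs) ['\n'] ((PySem.Chars.find (x :: xs) ['-', '-']).toNat + 2) hk hnl).1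
        omega
      rw [ih hnl, PySem.List.slice_from _ (by omega : (0:Int) ≤ PySem.Chars.findFrom (x :: xs) ['\n'] (PySem.Chars.find (x :: xs) ['-', '-'] + 2) none + 1)]
      simp
  | case4 x xs cs' d b hnd hline ih =>
    have hcs : cs' = x :: xs := rfl
    have hd' : d = PySem.Chars.find (x :: xs) ['-', '-'] := rfl
    have hb' : b = PySem.Chars.find (x :: xs) ['/', '*'] := rfl
    simp only [hcs, hd', hb'] at hnd hline ih ⊢
    have hb : PySem.Chars.find (x :: xs) ['/', '*'] ≠ -1 := fun hbb => hline (Or.inl hbb)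
    have h0 : (0 : Int) ≤ PySem.Chars.find (x :: xs) ['/', '*'] := by
      have := PySem.Chars.neg_one_le_find (x :: xs) ['/', '*']; omega
    obtain ⟨hpre, hminb⟩ := PySem.Chars.find_spec h0
    have hmind : ∀ i < (PySem.Chars.find (x :: xs) ['/', '*']).toNat,
        ¬ ['-', '-'] <+: (x :: xs).drop i := by
      by_cases hdd : PySem.Chars.find (x :: xs) ['-', '-'] = -1
      · intro i hi hp
        exact (PySem.Chars.find_eq_neg_one_iff _ _).mp hdd (pvPrefix_drop_infix hp)
      · intro i hi
        have h0d : (0 : Int) ≤ PySem.Chars.find (x :: xs) ['-', '-'] := by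
          have := PySem.Chars.neg_one_le_find (x :: xs) ['-', '-']; omega
        have hble : PySem.Chars.find (x :: xs) ['/', '*'] ≤ PySem.Chars.find (x :: xs) ['-', '-'] := by
          by_contra hlt
          exact hline (Or.inr ⟨hdd, by omega⟩)
        exact (PySem.Chars.find_spec h0d).2 i (by omega)
    have hk := pvFind2_add_two_le (x :: xs) '/' '*' hb
    have hstrip := pvHStrip_take (x :: xs) (PySem.Chars.find (x :: xs) ['/', '*']).toNat
      (fun i hi => ⟨hmind i hi, hminb i hi⟩)
    obtain ⟨t, ht⟩ := hpre
    have ht2 : t = (x :: xs).drop ((PySem.Chars.find (x :: xs) ['/', '*']).toNat + 2) := by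
      simpa [List.drop_drop, Nat.add_comm] using congrArg (List.drop 2) ht
    rw [hstrip, ← ht]
    simp only [List.cons_append, List.nil_append]
    rw [pvHStrip_cons_block '/' ('*' :: t) (by simp) (by simp)]
    simp only [List.tail_cons]
    rw [ht2]
    have hdt := pvDropThru2_findFrom (x :: xs) '*' '/' ((PySem.Chars.find (x :: xs) ['/', '*']).toNat + 2) hk
    have hcast : ((((PySem.Chars.find (x :: xs) ['/', '*']).toNat + 2 : Nat)) : Int)
        = PySem.Chars.find (x :: xs) ['/', '*'] + 2 := by omega
    rw [hcast] at hdt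
    rw [hdt, PySem.List.slice_to _ h0]
    split
    · rename_i hnl
      simp [pvHStrip]
    · rename_i hnl
      have hnn : (0 : Int) ≤ PySem.Chars.findFrom (x :: xs) ['*', '/'] (PySem.Chars.find (x :: xs) ['/', '*'] + 2) none := by
        rw [← hcast] at hnl ⊢
        have hs := (PySem.Chars.findFrom_natCast_spec (x :: xs) ['*', '/'] ((PySem.Chars.find (x :: xs) ['/', '*']).toNat + 2) hk hnl).1
        omega
      rw [ih hnl, PySem.List.slice_from _ (by omega : (0:Int) ≤ PySem.Chars.findFrom (x :: xs) ['*', '/'] (PySem.Chars.find (x :: xs) ['/', '*'] + 2) none + 2)]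
      simp

theorem pvFirstWord_space (l : List Char) : pvFirstWord (' ' :: l) = pvFirstWord l := by
  simp [pvFirstWord, (by decide : pvIsWord ' ' = false)]

theorem pvTakeWhile_hStrip (r : List Char) :
    (pvHStrip r).takeWhile pvIsWord = r.takeWhile pvIsWord := by
  fun_induction pvHStrip r with
  | case1 => rfl
  | case2 c r hc ih =>
    rw [hc.1]
    simp [(by decide : pvIsWord ' ' = false), (by decide : pvIsWord '-' = false)]
  | case3 c r hc1 hc ih =>
    rw [hc.1]
    simp [(by decide : pvIsWord ' ' = false), (by decide : pvIsWord '/' = false)]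
  | case4 c r hc1 hc2 ih =>
    rw [List.takeWhile_cons, List.takeWhile_cons]
    cases hw : pvIsWord c <;> simp [ih]

theorem pvFirstKw_eq (cs : List Char) : pvFirstKw cs = pvFirstWord (pvHStrip cs) := by
  fun_induction pvFirstKw cs with
  | case1 => simp [pvHStrip, pvFirstWord]
  | case2 c r hc ih =>
    rw [ih, pvHStrip_cons_line _ _ hc, pvFirstWord_space]
  | case3 c r hc1 hc ih =>
    rw [ih, pvHStrip_cons_block _ _ hc1 hc, pvFirstWord_space]
  | case4 c r hc1 hc2 hw =>
    rw [pvHStrip_cons_skip _ _ hc1 hc2]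
    simp [pvFirstWord, hw, pvTakeWhile_hStrip]
  | case5 c r hc1 hc2 hw ih =>
    have hw' : pvIsWord c = false := by simpa using hw
    rw [ih, pvHStrip_cons_skip _ _ hc1 hc2]
    simp [pvFirstWord, hw']

theorem pvGo_acc (s cur : List Char) (acc : List (List Char)) :
    PySem.Chars.split₀.go s cur acc = acc.reverse ++ PySem.Chars.split₀.go s cur [] := by
  induction s generalizing cur acc with
  | nil =>
    simp only [PySem.Chars.split₀.go]
    cases hc : cur.isEmpty <;> simp
  | cons c rest ih =>
    simp only [PySem.Chars.split₀.go]
    cases hsp : PySem.Chars.isspace c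
    · simp only [Bool.false_eq_true, if_false]
      exact ih _ _
    · simp only [if_true]
      cases hc : cur.isEmpty
      · simp only [Bool.false_eq_true, if_false]
        rw [ih [] (cur.reverse :: acc), ih [] [cur.reverse]]
        simp
      · simp only [if_true]
        exact ih _ _

theorem pvGo_head_nonempty (s cur : List Char) (h : cur ≠ []) :
    (PySem.Chars.split₀.go s cur []).head? =
      some (cur.reverse ++ s.takeWhile (fun c => !PySem.Chars.isspace c)) := by
  induction s generalizing cur with
  | nil =>
    simp only [PySem.Chars.split₀.go]
    rw [if_neg (by simpa using h)]
    simp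
  | cons c rest ih =>
    simp only [PySem.Chars.split₀.go]
    cases hsp : PySem.Chars.isspace c
    · simp only [Bool.false_eq_true, if_false]
      rw [ih (c :: cur) (by simp)]
      simp [hsp]
    · simp only [if_true]
      rw [if_neg (by simpa using h)]
      rw [pvGo_acc]
      simp [hsp]

theorem pvGo_head (s : List Char) :
    (PySem.Chars.split₀.go s [] []).head? = pvFirstNS s := by
  induction s with
  | nil => simp [PySem.Chars.split₀.go, pvFirstNS]
  | cons c rest ih =>
    simp only [PySem.Chars.split₀.go, pvFirstNS]
    cases hsp : PySem.Chars.isspace c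
    · simp only [Bool.false_eq_true, if_false]
      rw [pvGo_head_nonempty rest [c] (by simp)]
      simp
    · simp only [if_true, List.isEmpty_nil]
      exact ih

theorem pvMask_takeWhile (r : List Char) :
    (pvMask r).takeWhile (fun c => !PySem.Chars.isspace c) = r.takeWhile pvIsWord := by
  induction r with
  | nil => simp [pvMask]
  | cons x xs ih =>
    simp only [pvMask, List.map_cons]
    cases hw : pvIsWord x
    · have hw' : (PySem.Chars.isalpha x || x == '_') = false := hw
      rw [if_neg (by simp [hw'])]
      simp [hw, (by decide : PySem.Chars.isspace ' ' = true)]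
    · have hw' : (PySem.Chars.isalpha x || x == '_') = true := hw
      rw [if_pos hw']
      simp only [List.takeWhile_cons, pvWord_not_space x hw, hw, Bool.not_false, if_true]
      rw [← ih]
      simp [pvMask]

theorem pvFirstNS_mask (l : List Char) : pvFirstNS (pvMask l) = pvFirstWord l := by
  induction l with
  | nil => simp [pvMask, pvFirstNS, pvFirstWord]
  | cons x xs ih =>
    simp only [pvMask, List.map_cons]
    cases hw : pvIsWord x
    · have hw' : (PySem.Chars.isalpha x || x == '_') = false := hw
      rw [show (if (PySem.Chars.isalpha x || x == '_') = true then x else ' ') = ' ' from by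
        simp [hw']]
      rw [show pvFirstNS (' ' :: List.map (fun c => if PySem.Chars.isalpha c || c == '_' then c else ' ') xs)
            = pvFirstNS (List.map (fun c => if PySem.Chars.isalpha c || c == '_' then c else ' ') xs) from by
        simp [pvFirstNS, (by decide : PySem.Chars.isspace ' ' = true)]]
      simp only [pvMask] at ih
      rw [ih]
      simp [pvFirstWord, hw]
    · have hw' : (PySem.Chars.isalpha x || x == '_') = true := hw
      rw [show (if (PySem.Chars.isalpha x || x == '_') = true then x else ' ') = x from by
        simp [hw']]
      rw [show pvFirstNS (x :: List.map (fun c => if PySem.Chars.isalpha c || c == '_' then c else ' ') xs)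
            = some (x :: (List.map (fun c => if PySem.Chars.isalpha c || c == '_' then c else ' ') xs).takeWhile
                (fun c => !PySem.Chars.isspace c)) from by
        simp [pvFirstNS, pvWord_not_space x hw]]
      have htw := pvMask_takeWhile xs
      simp only [pvMask] at htw
      rw [htw]
      simp [pvFirstWord, hw]

theorem pvSplit_head (l : List Char) :
    (PySem.Chars.split₀ (pvMask l)).head? = pvFirstWord l := by
  rw [show PySem.Chars.split₀ (pvMask l) = PySem.Chars.split₀.go (pvMask l) [] [] from rfl,
    pvGo_head, pvFirstNS_mask]

-- ===== VERDICT (by name: the statement is the Claim_ definition above) =====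
theorem extract_first_keyword_py_spec : Claim_equal_extract_first_keyword_py := by
  intro sql _
  unfold Spec_extract_first_keyword_py extract_first_keyword_py extract_first_keyword_py_alt
  have h1 := pvALoop_eq sql.toList 0
  simp only [List.drop_zero] at h1
  have h2 := pvSplit_head (pvHStrip sql.toList)
  rw [pvFirstKw_eq] at h1
  rw [pvBStrip_eq]
  rcases hs : PySem.Chars.split₀ (pvMask (pvHStrip sql.toList)) with _ | ⟨w, ws⟩ <;>
    rw [hs] at h2 <;> simp at h2 <;> simp only [hs] <;> rw [h1, ← h2] <;> simp
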